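-- pv_equiv track=rewrite | github.com/yislennierm/Espnow-Link | tools/ghst_plot.py | decode_frame
-- ===== SOURCE A (Python) =====
-- NUM_CHANNELS = 8  # Adjust based on how many you expect
--
-- def decode_frame(bytes_list):
--     """Decode GHST 12-bit channel frame into channel values."""
--     # Skip sync/len/type if present
--     if len(bytes_list) < 4:
--         return []
--
--     # Usually format is: [SYNC][LEN][TYPE][PAYLOAD...][CRC]
--     # We only care about PAYLOAD part for channel values
--     payload = bytes_list[3:-1]  # drop header + CRC
--
--     chans = []
--     bitbuf = 0
--     bits = 0
--     for b in payload:
--         bitbuf |= b << bits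
--         bits += 8
--         while bits >= 12 and len(chans) < NUM_CHANNELS:
--             chans.append(bitbuf & 0xFFF)  # 12-bit mask
--             bitbuf >>= 12
--             bits -= 12
--     return chans
-- ===== SOURCE B (Python) =====
-- NUM_CHANNELS = 8
--
-- def decode_frame(bytes_list):
--     """Decode GHST 12-bit channel frame into channel values."""
--     payload = bytes_list[3:-1]  # drop header + CRC
--     total = 0
--     for i, b in enumerate(payload):
--         total |= b << (8 * i)
--     n = min(NUM_CHANNELS, (8 * len(payload)) // 12)
--     return [(total >> (12 * i)) & 0xFFF for i in range(n)]
-- ===== Notes on version B (the rewrite author's own statement) =====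
-- stated objective: simpler
-- what changed: A's interleaved bit-buffer while-loop (carrying bitbuf/bits/chans and extracting 12-bit channels as bytes arrive) is replaced by one OR-accumulation pass building a single big integer, an arithmetic channel count min(8, 8*len(payload)//12), and a direct comprehension extracting each 12-bit field by shift-and-mask.
import Mathlib
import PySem

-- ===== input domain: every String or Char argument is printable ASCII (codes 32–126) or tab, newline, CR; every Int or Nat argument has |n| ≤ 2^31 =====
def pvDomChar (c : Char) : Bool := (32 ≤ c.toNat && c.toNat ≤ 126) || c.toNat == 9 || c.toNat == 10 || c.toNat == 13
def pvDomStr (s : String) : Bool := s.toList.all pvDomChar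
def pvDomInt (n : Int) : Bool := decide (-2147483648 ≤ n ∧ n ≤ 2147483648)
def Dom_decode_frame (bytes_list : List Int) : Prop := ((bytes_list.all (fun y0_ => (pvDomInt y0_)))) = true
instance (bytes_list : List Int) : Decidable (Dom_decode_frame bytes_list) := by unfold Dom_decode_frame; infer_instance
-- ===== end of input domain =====

-- B replaces A's interleaved bit-buffer while-loop by one OR-accumulation pass building a single
-- big integer plus an arithmetic channel count and direct 12-bit extraction (objective: simpler).

-- ===== PORT A =====
-- A's inner 'while bits >= 12 and len(chans) < NUM_CHANNELS' loop; Python's bit counter 'bits'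
-- is always a nonnegative int, kept as Nat; '& 0xFFF' = PySem.Int.band, '>>= 12' = Int '>>> 12'.
def ghstInner (bitbuf : Int) (bits : Nat) (chans : List Int) : Int × Nat × List Int :=
  if _h : 12 ≤ bits ∧ chans.length < 8 then
    ghstInner (bitbuf >>> (12 : Nat)) (bits - 12) (chans ++ [PySem.Int.band bitbuf 0xFFF])
  else (bitbuf, bits, chans)
termination_by bits
decreasing_by omega

def decode_frame (bytes_list : List Int) : List Int :=
  if bytes_list.length < 4 then []
  else
    let payload := PySem.List.slice bytes_list (some 3) (some (-1))
    let st := payload.foldl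
      (fun (st : Int × Nat × List Int) (b : Int) =>
        ghstInner (PySem.Int.bor st.1 (b <<< st.2.1)) (st.2.1 + 8) st.2.2)
      (0, 0, [])
    st.2.2

-- ===== PORT B =====
-- 'for i, b in enumerate(payload): total |= b << (8*i)' (indices are nonnegative: List.zipIdx)
def decode_frame_alt (bytes_list : List Int) : List Int :=
  let payload := PySem.List.slice bytes_list (some 3) (some (-1))
  let total := payload.zipIdx.foldl (fun (t : Int) (bi : Int × Nat) => PySem.Int.bor t (bi.1 <<< (8 * bi.2))) 0
  let n := min 8 (8 * payload.length / 12)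
  (List.range n).map fun (i : Nat) => PySem.Int.band (total >>> (12 * i)) 0xFFF

-- ===== PRECONDITION & SPEC =====
def Spec_decode_frame (bytes_list : List Int) (out : List Int) : Prop := out = decode_frame_alt bytes_list
instance (bytes_list : List Int) (out : List Int) : Decidable (Spec_decode_frame bytes_list out) := by unfold Spec_decode_frame; infer_instance

-- ===== CLAIM (what is proved, stated in full; the proofs are below) =====
def Claim_equal_decode_frame : Prop := ∀ (bytes_list : List Int), Dom_decode_frame bytes_list → Spec_decode_frame bytes_list (decode_frame bytes_list)

-- ===== LEMMAS AND PROOFS =====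

-- Bit-level characterisation of the PySem/core integer bit operations via Int.testBit.

theorem pvNatLdiffDivTwo (m n : Nat) : (m.ldiff n) / 2 = (m / 2).ldiff (n / 2) := by
  apply Nat.eq_of_testBit_eq
  intro i
  simp [Nat.testBit_div_two, Nat.testBit_ldiff]

theorem pvNatAndAddLdiff (m n : Nat) : (m &&& n) + m.ldiff n = m := by
  induction m using Nat.strong_induction_on generalizing n with
  | _ m ih =>
    rcases Nat.eq_zero_or_pos m with hm | hm
    · subst hm
      have h0 : Nat.ldiff 0 n = 0 := by
        apply Nat.eq_of_testBit_eq; intro i; simp [Nat.testBit_ldiff]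
      simp [h0]
    · have hA2 : (m &&& n) / 2 = (m / 2) &&& (n / 2) := Nat.and_div_two
      have hD2 : (m.ldiff n) / 2 = (m / 2).ldiff (n / 2) := pvNatLdiffDivTwo m n
      have hIH : ((m / 2) &&& (n / 2)) + (m / 2).ldiff (n / 2) = m / 2 :=
        ih (m / 2) (by omega) (n / 2)
      have hA0 : decide ((m &&& n) % 2 = 1) = (decide (m % 2 = 1) && decide (n % 2 = 1)) := by
        rw [← Nat.testBit_zero, ← Nat.testBit_zero, ← Nat.testBit_zero, Nat.testBit_and]
      have hD0 : decide ((m.ldiff n) % 2 = 1) = (decide (m % 2 = 1) && !decide (n % 2 = 1)) := by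
        rw [← Nat.testBit_zero, ← Nat.testBit_zero, ← Nat.testBit_zero, Nat.testBit_ldiff]
      rcases Nat.mod_two_eq_zero_or_one m with h | h <;>
        rcases Nat.mod_two_eq_zero_or_one n with h' | h' <;>
          simp only [h, h', decide_eq_true_eq, Nat.zero_ne_one, decide_false, decide_true,
            Bool.and_false, Bool.and_true, Bool.not_false, Bool.not_true,
            decide_eq_false_iff_not] at hA0 hD0 <;> omega

theorem pvNatSubAnd (m n : Nat) : m - (m &&& n) = m.ldiff n := by
  have h := pvNatAndAddLdiff m n
  omega

theorem pvTbExt {x y : Int} (h : ∀ i, x.testBit i = y.testBit i) : x = y := by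
  cases x with
  | ofNat a =>
    cases y with
    | ofNat b =>
      have : a = b := by
        apply Nat.eq_of_testBit_eq; intro i; exact h i
      simp [this]
    | negSucc b =>
      exfalso
      have ha : a.testBit (a + b) = false :=
        Nat.testBit_lt_two_pow (lt_of_lt_of_le (Nat.lt_two_pow_self) (Nat.pow_le_pow_right (by norm_num) (by omega)))
      have hb : b.testBit (a + b) = false :=
        Nat.testBit_lt_two_pow (lt_of_lt_of_le (Nat.lt_two_pow_self) (Nat.pow_le_pow_right (by norm_num) (by omega)))
      have := h (a + b)
      simp [Int.testBit, ha, hb] at this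
  | negSucc a =>
    cases y with
    | ofNat b =>
      exfalso
      have ha : a.testBit (a + b) = false :=
        Nat.testBit_lt_two_pow (lt_of_lt_of_le (Nat.lt_two_pow_self) (Nat.pow_le_pow_right (by norm_num) (by omega)))
      have hb : b.testBit (a + b) = false :=
        Nat.testBit_lt_two_pow (lt_of_lt_of_le (Nat.lt_two_pow_self) (Nat.pow_le_pow_right (by norm_num) (by omega)))
      have := h (a + b)
      simp [Int.testBit, ha, hb] at this
    | negSucc b =>
      have : a = b := by
        apply Nat.eq_of_testBit_eq; intro i
        have := h i
        simpa [Int.testBit] using this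
      simp [this]

theorem pvTbBor (a b : Int) (i : Nat) :
    (PySem.Int.bor a b).testBit i = (a.testBit i || b.testBit i) := by
  cases a with
  | ofNat m =>
    cases b with
    | ofNat n =>
      simp [PySem.Int.bor, Int.testBit]
    | negSucc n =>
      have hneg : ¬ (0 : Int) ≤ Int.negSucc n := by exact of_decide_eq_false rfl
      have htn : ((-(Int.negSucc n) - 1).toNat) = n := by simp [Int.negSucc_eq]
      have hval : PySem.Int.bor (Int.ofNat m) (Int.negSucc n) =
          Int.negSucc (n - (n &&& m)) := by
        unfold PySem.Int.bor
        rw [if_pos (by exact Int.natCast_nonneg m), if_neg hneg, htn, Int.negSucc_eq]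
        have hm : (Int.ofNat m).toNat = m := rfl
        rw [hm]; ring
      rw [hval, pvNatSubAnd]
      simp [Int.testBit, Nat.testBit_ldiff]
      cases m.testBit i <;> cases n.testBit i <;> rfl
  | negSucc m =>
    cases b with
    | ofNat n =>
      have hneg : ¬ (0 : Int) ≤ Int.negSucc m := by exact of_decide_eq_false rfl
      have htm : ((-(Int.negSucc m) - 1).toNat) = m := by simp [Int.negSucc_eq]
      have hval : PySem.Int.bor (Int.negSucc m) (Int.ofNat n) =
          Int.negSucc (m - (m &&& n)) := by
        unfold PySem.Int.bor
        rw [if_neg hneg, if_pos (by exact Int.natCast_nonneg n), htm, Int.negSucc_eq]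
        have hn : (Int.ofNat n).toNat = n := rfl
        rw [hn]; ring
      rw [hval, pvNatSubAnd]
      simp [Int.testBit, Nat.testBit_ldiff]
    | negSucc n =>
      have hnegm : ¬ (0 : Int) ≤ Int.negSucc m := by exact of_decide_eq_false rfl
      have hnegn : ¬ (0 : Int) ≤ Int.negSucc n := by exact of_decide_eq_false rfl
      have htm : ((-(Int.negSucc m) - 1).toNat) = m := by simp [Int.negSucc_eq]
      have htn : ((-(Int.negSucc n) - 1).toNat) = n := by simp [Int.negSucc_eq]
      have hval : PySem.Int.bor (Int.negSucc m) (Int.negSucc n) =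
          Int.negSucc (m &&& n) := by
        unfold PySem.Int.bor
        rw [if_neg hnegm, if_neg hnegn, htm, htn, Int.negSucc_eq]
        ring
      rw [hval]
      simp [Int.testBit, Nat.testBit_and]

theorem pvTbBand (a b : Int) (i : Nat) :
    (PySem.Int.band a b).testBit i = (a.testBit i && b.testBit i) := by
  cases a with
  | ofNat m =>
    cases b with
    | ofNat n =>
      simp [PySem.Int.band, Int.testBit, Nat.testBit_and]
    | negSucc n =>
      have hneg : ¬ (0 : Int) ≤ Int.negSucc n := by exact of_decide_eq_false rfl
      have htn : ((-(Int.negSucc n) - 1).toNat) = n := by simp [Int.negSucc_eq]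
      have hval : PySem.Int.band (Int.ofNat m) (Int.negSucc n) =
          Int.ofNat (m - (m &&& n)) := by
        unfold PySem.Int.band
        rw [if_pos (by exact Int.natCast_nonneg m), if_neg hneg, htn]
        rfl
      rw [hval, pvNatSubAnd]
      simp [Int.testBit, Nat.testBit_ldiff]
  | negSucc m =>
    cases b with
    | ofNat n =>
      have hneg : ¬ (0 : Int) ≤ Int.negSucc m := by exact of_decide_eq_false rfl
      have htm : ((-(Int.negSucc m) - 1).toNat) = m := by simp [Int.negSucc_eq]
      have hval : PySem.Int.band (Int.negSucc m) (Int.ofNat n) =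
          Int.ofNat (n - (n &&& m)) := by
        unfold PySem.Int.band
        rw [if_neg hneg, if_pos (by exact Int.natCast_nonneg n), htm]
        rfl
      rw [hval, pvNatSubAnd]
      simp [Int.testBit, Nat.testBit_ldiff]
      cases m.testBit i <;> cases n.testBit i <;> rfl
    | negSucc n =>
      have hnegm : ¬ (0 : Int) ≤ Int.negSucc m := by exact of_decide_eq_false rfl
      have hnegn : ¬ (0 : Int) ≤ Int.negSucc n := by exact of_decide_eq_false rfl
      have htm : ((-(Int.negSucc m) - 1).toNat) = m := by simp [Int.negSucc_eq]
      have htn : ((-(Int.negSucc n) - 1).toNat) = n := by simp [Int.negSucc_eq]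
      have hval : PySem.Int.band (Int.negSucc m) (Int.negSucc n) =
          Int.negSucc (m ||| n) := by
        unfold PySem.Int.band
        rw [if_neg hnegm, if_neg hnegn, htm, htn, Int.negSucc_eq]
        ring
      rw [hval]
      simp [Int.testBit]

theorem pvNatMulShiftSubOne (s m i : Nat) :
    ((m + 1) * 2 ^ s - 1).testBit i = (if i < s then true else m.testBit (i - s)) := by
  induction s generalizing i with
  | zero => simp
  | succ s ih =>
    have hpos : 1 ≤ (m + 1) * 2 ^ s := Nat.one_le_iff_ne_zero.mpr (by positivity)
    have h2 : (m + 1) * 2 ^ (s + 1) = 2 * ((m + 1) * 2 ^ s) := by ring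
    have hval : (m + 1) * 2 ^ (s + 1) - 1 = 2 * ((m + 1) * 2 ^ s - 1) + 1 := by omega
    cases i with
    | zero =>
      rw [Nat.testBit_zero]
      simp [hval]
    | succ i =>
      rw [Nat.testBit_succ, hval]
      have : (2 * ((m + 1) * 2 ^ s - 1) + 1) / 2 = (m + 1) * 2 ^ s - 1 := by omega
      rw [this, ih i]
      simp [Nat.succ_sub_succ]

theorem pvTbShl (a : Int) (n i : Nat) :
    (a <<< n).testBit i = (decide (n ≤ i) && a.testBit (i - n)) := by
  cases a with
  | ofNat m =>
    have : (Int.ofNat m) <<< n = Int.ofNat (m <<< n) := rfl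
    rw [this]
    simp [Int.testBit, Nat.testBit_shiftLeft]
  | negSucc m =>
    have : (Int.negSucc m) <<< n = Int.negSucc ((m + 1) <<< n - 1) := rfl
    rw [this]
    simp only [Int.testBit]
    rw [Nat.shiftLeft_eq, pvNatMulShiftSubOne]
    by_cases h : i < n <;> simp [h] <;> omega

theorem pvTbShr (a : Int) (n i : Nat) :
    (a >>> n).testBit i = a.testBit (i + n) := by
  cases a with
  | ofNat m =>
    have : (Int.ofNat m) >>> n = Int.ofNat (m >>> n) := rfl
    rw [this]
    simp [Int.testBit, Nat.testBit_shiftRight, Nat.add_comm]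
  | negSucc m =>
    rw [Int.negSucc_shiftRight]
    simp [Int.testBit, Nat.testBit_shiftRight, Nat.add_comm]

theorem pvTbMask (i : Nat) : (0xFFF : Int).testBit i = decide (i < 12) := by
  have : (0xFFF : Int).testBit i = (4095 : Nat).testBit i := rfl
  rw [this]
  have h4095 : (4095 : Nat) = 2 ^ 12 - 1 := by norm_num
  rw [h4095, Nat.testBit_two_pow_sub_one]

-- derived engine lemmas

theorem pvBorAssoc (a b c : Int) :
    PySem.Int.bor (PySem.Int.bor a b) c = PySem.Int.bor a (PySem.Int.bor b c) := by
  apply pvTbExt; intro i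
  simp [pvTbBor, Bool.or_assoc]

theorem pvBorShr (x y : Int) (j : Nat) :
    (PySem.Int.bor x y) >>> j = PySem.Int.bor (x >>> j) (y >>> j) := by
  apply pvTbExt; intro i
  simp [pvTbBor, pvTbShr]

theorem pvShrShr (x : Int) (a b : Nat) : (x >>> a) >>> b = x >>> (a + b) := by
  rw [Int.shiftRight_add]

theorem pvStable (x b : Int) (m j : Nat) (h : j + 12 ≤ m) :
    PySem.Int.band ((PySem.Int.bor x (b <<< m)) >>> j) 0xFFF =
      PySem.Int.band (x >>> j) 0xFFF := by
  apply pvTbExt; intro i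
  simp only [pvTbBand, pvTbBor, pvTbShr, pvTbShl, pvTbMask]
  by_cases hi : i < 12
  · have : ¬ m ≤ i + j := by omega
    simp [hi, this]
  · simp [hi]

-- the total as A consumes it: OR of b <<< 8*position

def pvOrAcc : List Int → Nat → Int
  | [], _ => 0
  | b :: t, k => PySem.Int.bor (b <<< (8 * k)) (pvOrAcc t (k + 1))

theorem pvFoldlOr (l : List Int) (k : Nat) (t : Int) :
    (l.zipIdx k).foldl (fun (t : Int) (bi : Int × Nat) => PySem.Int.bor t (bi.1 <<< (8 * bi.2))) t =
      PySem.Int.bor t (pvOrAcc l k) := by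
  induction l generalizing k t with
  | nil => simp [pvOrAcc, PySem.Int.bor_zero]
  | cons b rest ih =>
    rw [List.zipIdx_cons, List.foldl_cons, ih, pvOrAcc, pvBorAssoc]

def pvExtract (c : Nat) (T : Int) : List Int :=
  (List.range c).map fun (i : Nat) => PySem.Int.band (T >>> (12 * i)) 0xFFF

theorem pvExtractStable (c : Nat) (T b : Int) (m : Nat) (h : 12 * c ≤ m) :
    pvExtract c T = pvExtract c (PySem.Int.bor T (b <<< m)) := by
  unfold pvExtract
  apply List.map_congr_left
  intro i hi
  rw [List.mem_range] at hi
  rw [pvStable T b m (12 * i) (by omega)]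

theorem pvExtractLen (c : Nat) (T : Int) : (pvExtract c T).length = c := by
  simp [pvExtract]

theorem pvExtractSucc (c : Nat) (T : Int) :
    pvExtract c T ++ [PySem.Int.band (T >>> (12 * c)) 0xFFF] = pvExtract (c + 1) T := by
  simp [pvExtract, List.range_succ]

-- main loop invariant for A's fold

theorem pvLoopA (l : List Int) : ∀ (k : Nat) (T : Int),
    l.foldl
      (fun (st : Int × Nat × List Int) (b : Int) =>
        ghstInner (PySem.Int.bor st.1 (b <<< st.2.1)) (st.2.1 + 8) st.2.2)
      (T >>> (12 * min 8 (8 * k / 12)), 8 * k - 12 * min 8 (8 * k / 12),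
        pvExtract (min 8 (8 * k / 12)) T)
    = (PySem.Int.bor T (pvOrAcc l k) >>> (12 * min 8 (8 * (k + l.length) / 12)),
        8 * (k + l.length) - 12 * min 8 (8 * (k + l.length) / 12),
        pvExtract (min 8 (8 * (k + l.length) / 12)) (PySem.Int.bor T (pvOrAcc l k))) := by
  induction l with
  | nil =>
    intro k T
    simp [pvOrAcc, PySem.Int.bor_zero]
  | cons b t ih =>
    intro k T
    set c := min 8 (8 * k / 12) with hc
    have hck : 12 * c ≤ 8 * k := by omega
    have hcd : c < 8 → 8 * k < 12 * c + 12 := by omega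
    rw [List.foldl_cons]
    dsimp only
    have hsh : b <<< (8 * k - 12 * c) = (b <<< (8 * k)) >>> (12 * c) := by
      rw [Int.shiftLeft_shiftRight_eq_shiftLeft_of_le hck]
    have hbuf : PySem.Int.bor (T >>> (12 * c)) (b <<< (8 * k - 12 * c)) =
        (PySem.Int.bor T (b <<< (8 * k))) >>> (12 * c) := by
      rw [hsh, pvBorShr]
    rw [hbuf]
    set T1 := PySem.Int.bor T (b <<< (8 * k)) with hT1
    rw [pvExtractStable c T b (8 * k) hck, ← hT1]
    have hacc : PySem.Int.bor T1 (pvOrAcc t (k + 1)) = PySem.Int.bor T (pvOrAcc (b :: t) k) := by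
      rw [hT1, pvOrAcc, pvBorAssoc]
    have hlen : k + 1 + t.length = k + (b :: t).length := by
      simp [List.length_cons]; omega
    by_cases hext : c < 8 ∧ 12 ≤ 8 * k + 8 - 12 * c
    · -- exactly one extraction
      have hc1 : min 8 (8 * (k + 1) / 12) = c + 1 := by omega
      rw [ghstInner, dif_pos (by refine ⟨by omega, ?_⟩; rw [pvExtractLen]; omega)]
      rw [pvShrShr, pvExtractSucc]
      have h12 : 12 * c + 12 = 12 * (c + 1) := by ring
      rw [h12]
      rw [ghstInner, dif_neg (by
        intro hcon
        have := hcon.1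
        omega)]
      have hb : 8 * k - 12 * c + 8 - 12 = 8 * (k + 1) - 12 * (c + 1) := by omega
      rw [hb]
      have H := ih (k + 1) T1
      rw [hc1, hacc, hlen] at H
      exact H
    · -- no extraction
      have hc1 : min 8 (8 * (k + 1) / 12) = c := by omega
      rw [ghstInner, dif_neg (by
        intro hcon
        rw [pvExtractLen] at hcon
        omega)]
      have hb : 8 * k - 12 * c + 8 = 8 * (k + 1) - 12 * c := by omega
      rw [hb]
      have H := ih (k + 1) T1
      rw [hc1, hacc, hlen] at H
      exact H

theorem pvSliceShort (l : List Int) (h : l.length < 4) :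
    PySem.List.slice l (some 3) (some (-1)) = [] := by
  unfold PySem.List.slice PySem.List.clampIdx
  norm_num
  split
  · simp
  · have h3 : Int.toNat 3 = 3 := rfl
    rw [h3]
    omega

theorem pvBorZeroLeft (x : Int) : PySem.Int.bor 0 x = x := by
  rw [PySem.Int.bor_comm, PySem.Int.bor_zero]

theorem pvLoopA0 (l : List Int) :
    (l.foldl
      (fun (st : Int × Nat × List Int) (b : Int) =>
        ghstInner (PySem.Int.bor st.1 (b <<< st.2.1)) (st.2.1 + 8) st.2.2)
      (0, 0, [])).2.2
      = pvExtract (min 8 (8 * l.length / 12)) (pvOrAcc l 0) := by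
  have H := pvLoopA l 0 0
  have hmin : min 8 (8 * 0 / 12) = 0 := rfl
  rw [hmin] at H
  norm_num [pvExtract] at H
  rw [H]
  norm_num [pvBorZeroLeft, pvExtract]

-- ===== VERDICT (by name: the statement is the Claim_ definition above) =====
theorem decode_frame_spec : Claim_equal_decode_frame := by
  intro bytes_list _
  unfold Spec_decode_frame decode_frame decode_frame_alt
  by_cases h : bytes_list.length < 4
  · rw [if_pos h, pvSliceShort bytes_list h]
    simp
  · rw [if_neg h]
    dsimp only
    rw [pvLoopA0, pvFoldlOr, pvBorZeroLeft]
    rfl
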